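-- pv_equiv track=rewrite | github.com/kiscsonti/ContinueTheList | evaluation/evaluate_script.py | graph_eval_relaxed
-- ===== SOURCE A (Python) =====
-- from copy import copy, deepcopy
--
-- def normalize_triple(triple, add_sign=True):
--     new_triple = list()
--     for element in triple:
--         if element.startswith("?"):
--             new_triple.append("x")
--         elif add_sign and "http" in element:
--             new_triple.append("<" + element + ">")
--         else:
--             new_triple.append(element)
--
--     return new_triple
--
-- def graph_eval_relaxed(graph, explanation):
--     remaining_graph = copy(graph)
--     remaining_graph_normalized = [normalize_triple(triple, False) for triple in remaining_graph]
--     remaining_graph_normalized_as_string = ["#".join(triple) for triple in remaining_graph_normalized]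
--
--     for triple in explanation:
--         triple_normalized = normalize_triple(triple, True)
--         triple_normalized_as_string = "#".join(triple_normalized)
--         next_remaining_graph_normalized_as_string = list()
--         for item in remaining_graph_normalized_as_string:
--             if item != triple_normalized_as_string:
--                 next_remaining_graph_normalized_as_string.append(item)
--
--         remaining_graph_normalized_as_string = next_remaining_graph_normalized_as_string
--
--         if len(remaining_graph_normalized_as_string) == 0:
--             break
--
--     if len(remaining_graph_normalized_as_string) == 0:
--         return 1
--     return 0
-- ===== SOURCE B (Python) =====
-- def normalize_triple(triple, add_sign=True):
--     new_triple = list()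
--     for element in triple:
--         if element.startswith("?"):
--             new_triple.append("x")
--         elif add_sign and "http" in element:
--             new_triple.append("<" + element + ">")
--         else:
--             new_triple.append(element)
--     return new_triple
--
--
-- def graph_eval_relaxed(graph, explanation):
--     covered = {"#".join(normalize_triple(t, True)) for t in explanation}
--     return 1 if all("#".join(normalize_triple(t, False)) in covered for t in graph) else 0
-- ===== Notes on version B (the rewrite author's own statement) =====
-- stated objective: faster
-- what changed: Replaces A's per-explanation re-filtering of the whole remaining graph-string list with a set of normalized explanation strings built once and a single membership pass over the graph.
import Mathlib
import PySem

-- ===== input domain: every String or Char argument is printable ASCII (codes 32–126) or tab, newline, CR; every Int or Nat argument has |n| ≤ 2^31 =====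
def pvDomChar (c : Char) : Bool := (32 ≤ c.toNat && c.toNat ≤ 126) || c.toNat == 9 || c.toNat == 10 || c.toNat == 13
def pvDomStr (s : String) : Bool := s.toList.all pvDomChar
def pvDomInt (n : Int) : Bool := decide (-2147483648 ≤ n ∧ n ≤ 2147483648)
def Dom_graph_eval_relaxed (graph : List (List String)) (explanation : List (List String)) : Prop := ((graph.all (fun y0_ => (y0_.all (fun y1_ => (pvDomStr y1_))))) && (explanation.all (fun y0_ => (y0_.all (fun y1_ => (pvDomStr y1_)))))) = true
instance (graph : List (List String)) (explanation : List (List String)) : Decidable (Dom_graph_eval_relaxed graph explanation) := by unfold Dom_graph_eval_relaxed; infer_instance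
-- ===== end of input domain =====

-- ===== PORT A =====
-- B changes the algorithm: A repeatedly filters the remaining graph-string list per explanation; see PORT B.
-- helper: normalize_triple (A's module helper), literal loop with append
def normTripleA (triple : List String) (add_sign : Bool) : List String :=
  triple.foldl (fun new_triple element =>
    if PySem.Str.startswith element "?" then new_triple ++ ["x"]
    else if add_sign && PySem.Str.isIn "http" element then new_triple ++ ["<" ++ element ++ ">"]
    else new_triple ++ [element]) []

-- the 'for triple in explanation' loop with its early 'break' on an emptied list
def loopA (rem : List String) (explanation : List (List String)) : List String :=
  match explanation with
  | [] => rem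
  | t :: ts =>
      let s := PySem.Str.join "#" (normTripleA t true)
      let next := rem.foldl (fun acc item => if item ≠ s then acc ++ [item] else acc) []
      if next.length = 0 then next else loopA next ts

def graph_eval_relaxed (graph : List (List String)) (explanation : List (List String)) : Int :=
  let remaining_graph := graph
  let remaining_graph_normalized := remaining_graph.map (fun triple => normTripleA triple false)
  let remaining_graph_normalized_as_string := remaining_graph_normalized.map (fun triple => PySem.Str.join "#" triple)
  let final := loopA remaining_graph_normalized_as_string explanation
  if final.length = 0 then 1 else 0

-- ===== PORT B =====
def normTripleB (triple : List String) (add_sign : Bool) : List String :=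
  triple.foldl (fun new_triple element =>
    if PySem.Str.startswith element "?" then new_triple ++ ["x"]
    else if add_sign && PySem.Str.isIn "http" element then new_triple ++ ["<" ++ element ++ ">"]
    else new_triple ++ [element]) []

def graph_eval_relaxed_alt (graph : List (List String)) (explanation : List (List String)) : Int :=
  let covered : PySem.Set String :=
    PySem.Set.ofList (explanation.map (fun t => PySem.Str.join "#" (normTripleB t true)))
  if graph.all (fun t => PySem.Set.contains covered (PySem.Str.join "#" (normTripleB t false))) then 1 else 0

-- ===== PRECONDITION & SPEC =====
def Spec_graph_eval_relaxed (graph : List (List String)) (explanation : List (List String)) (out : Int) : Prop := out = graph_eval_relaxed_alt graph explanation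
instance (graph : List (List String)) (explanation : List (List String)) (out : Int) : Decidable (Spec_graph_eval_relaxed graph explanation out) := by unfold Spec_graph_eval_relaxed; infer_instance

-- ===== CLAIM (what is proved, stated in full; the proofs are below) =====
def Claim_equal_graph_eval_relaxed : Prop := ∀ (graph : List (List String)) (explanation : List (List String)), Dom_graph_eval_relaxed graph explanation → Spec_graph_eval_relaxed graph explanation (graph_eval_relaxed graph explanation)

-- ===== LEMMAS AND PROOFS =====
theorem normTriple_eq : normTripleA = normTripleB := rfl

-- one filtering pass of A's inner loop is a List.filter
theorem foldl_filter_step (rem : List String) (s : String) :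
    rem.foldl (fun acc item => if item ≠ s then acc ++ [item] else acc) [] =
      rem.filter (fun item => item ≠ s) := by
  have h : ∀ (acc : List String),
      rem.foldl (fun acc item => if item ≠ s then acc ++ [item] else acc) acc =
        acc ++ rem.filter (fun item => item ≠ s) := by
    induction rem with
    | nil => simp
    | cons x xs ih =>
        intro acc
        rw [List.foldl_cons, List.filter_cons]
        by_cases hx : x = s
        · rw [if_neg (by simp [hx]), ih]
          simp [hx]
        · rw [if_pos hx, ih]
          simp [hx]
  simpa using h []

-- A's explanation loop computes one big filter (the break returns [] = any filter of [])
theorem loopA_eq_filter (explanation : List (List String)) (rem : List String) :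
    loopA rem explanation =
      rem.filter (fun item =>
        explanation.all (fun t => item ≠ PySem.Str.join "#" (normTripleA t true))) := by
  induction explanation generalizing rem with
  | nil => simp [loopA]
  | cons t ts ih =>
      simp only [loopA, foldl_filter_step]
      by_cases h : (rem.filter (fun item => item ≠ PySem.Str.join "#" (normTripleA t true))).length = 0
      · rw [if_pos h]
        have hnil : rem.filter (fun item => item ≠ PySem.Str.join "#" (normTripleA t true)) = [] :=
          List.eq_nil_of_length_eq_zero h
        rw [hnil]
        symm
        rw [List.filter_eq_nil_iff]
        intro a ha hc
        have h1 := (List.filter_eq_nil_iff.mp hnil) a ha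
        simp only [List.all_cons, Bool.and_eq_true] at hc
        exact h1 hc.1
      · rw [if_neg h, ih, List.filter_filter]
        congr 1
        funext item
        simp [Bool.and_comm]

-- A's final emptiness test ↔ B's all-membership test
theorem empty_iff_all (graph explanation : List (List String)) :
    ((((graph.map (fun triple => normTripleA triple false)).map
        (fun triple => PySem.Str.join "#" triple)).filter (fun item =>
        explanation.all (fun t => item ≠ PySem.Str.join "#" (normTripleA t true)))).length = 0
      ↔ graph.all (fun t => PySem.Set.contains
          (PySem.Set.ofList (explanation.map (fun t => PySem.Str.join "#" (normTripleA t true))))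
          (PySem.Str.join "#" (normTripleA t false))) = true) := by
  rw [List.length_eq_zero_iff, List.filter_eq_nil_iff, List.all_eq_true]
  constructor
  · intro h t ht
    have h1 := h (PySem.Str.join "#" (normTripleA t false))
      (by simp only [List.map_map, List.mem_map]; exact ⟨t, ht, rfl⟩)
    simp only [List.all_eq_true, not_forall] at h1
    obtain ⟨u, hu, hne⟩ := h1
    simp only [ne_eq, decide_eq_true_eq, not_not] at hne
    simp only [PySem.Set.contains]
    rw [List.contains_eq_mem, decide_eq_true_eq, PySem.Set.mem_ofList, List.mem_map]
    exact ⟨u, hu, hne.symm⟩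
  · intro h a ha
    simp only [List.map_map, List.mem_map] at ha
    obtain ⟨t, ht, rfl⟩ := ha
    have h1 := h t ht
    simp only [PySem.Set.contains] at h1
    rw [List.contains_eq_mem, decide_eq_true_eq, PySem.Set.mem_ofList, List.mem_map] at h1
    obtain ⟨u, hu, heq⟩ := h1
    rw [List.all_eq_true]
    intro hc
    have h2 := hc u hu
    simp only [ne_eq, decide_eq_true_eq] at h2
    exact h2 heq.symm

-- ===== VERDICT (by name: the statement is the Claim_ definition above) =====
theorem graph_eval_relaxed_spec : Claim_equal_graph_eval_relaxed := by
  unfold Claim_equal_graph_eval_relaxed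
  intro graph explanation _
  unfold Spec_graph_eval_relaxed graph_eval_relaxed graph_eval_relaxed_alt
  simp only [loopA_eq_filter, ← normTriple_eq]
  by_cases h : graph.all (fun t => PySem.Set.contains
      (PySem.Set.ofList (explanation.map (fun t => PySem.Str.join "#" (normTripleA t true))))
      (PySem.Str.join "#" (normTripleA t false))) = true
  · rw [if_pos ((empty_iff_all graph explanation).mpr h), if_pos h]
  · rw [if_neg (fun hc => h ((empty_iff_all graph explanation).mp hc)), if_neg h]
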